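-- pv_equiv track=rewrite | github.com/CGRU/cgru | afanasy/python/afpathmap.py | findPathEnd
-- ===== SOURCE A (Python) =====
-- PathSeparators = ' ";=,\':'
--
-- def findPathEnd( path):
-- 	position = 0
-- 	pathlen = len(path)
-- 	if pathlen <= 1: return 1
-- 	while position < pathlen:
-- 		position += 1
-- 		if position >= pathlen: break
-- 		if path[position] in PathSeparators: break
-- 	return position
-- ===== SOURCE B (Python) =====
-- PathSeparators = ' ";=,\':'
--
--
-- def findPathEnd(path):
--     if len(path) <= 1:
--         return 1
--     hits = [i for i in (path.find(sep, 1) for sep in PathSeparators) if i >= 0]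
--     return min(hits) if hits else len(path)
-- ===== Notes on version B (the rewrite author's own statement) =====
-- stated objective: faster
-- what changed: B inverts the traversal: instead of scanning path positions one by one and testing each character against the separator string, it asks str.find for each separator character's first occurrence after index 1 and takes the minimum (falling back to len(path)).
import Mathlib
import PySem

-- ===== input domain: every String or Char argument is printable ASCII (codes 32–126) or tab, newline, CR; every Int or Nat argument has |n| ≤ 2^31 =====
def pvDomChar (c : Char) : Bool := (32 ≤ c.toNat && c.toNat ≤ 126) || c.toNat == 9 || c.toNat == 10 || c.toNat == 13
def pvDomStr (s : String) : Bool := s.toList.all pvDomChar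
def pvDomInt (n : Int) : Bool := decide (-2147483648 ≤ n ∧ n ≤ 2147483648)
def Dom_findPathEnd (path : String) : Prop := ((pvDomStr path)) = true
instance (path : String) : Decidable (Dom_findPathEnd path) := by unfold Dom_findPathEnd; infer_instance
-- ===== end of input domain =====

-- B changes the traversal: instead of A's positional scan over the path, B computes each
-- separator character's first occurrence after index 1 via str.find and takes the minimum
-- (objective: alternative formulation, same behaviour).

-- ===== PORT A =====
def pathSeparators : List Char := " \";=,':".toList

-- the while loop of A: position is the loop variable, pathlen = len(path)
def findPathEndLoop (path : List Char) (pathlen : Nat) (position : Nat) : Nat :=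
  if _h : position < pathlen then
    -- position += 1
    let p1 := position + 1
    -- if position >= pathlen: break
    if pathlen ≤ p1 then p1
    -- if path[position] in PathSeparators: break  (index p1 < pathlen is in range)
    else if PySem.Chars.isIn [path.getD p1 ' '] pathSeparators then p1
    else findPathEndLoop path pathlen p1
  else position
termination_by pathlen - position

def findPathEnd (path : String) : Int :=
  let pathlen := path.length
  if pathlen ≤ 1 then 1
  else (findPathEndLoop path.toList pathlen 0 : Int)

-- ===== PORT B =====
def findPathEnd_alt (path : String) : Int :=
  if path.length ≤ 1 then 1
  else
    match PySem.List.min? ((pathSeparators.map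
      (fun sep => PySem.Str.findFrom path (String.ofList [sep]) 1)).filter
        (fun i => 0 ≤ i)) (fun x => x) with
    | some m => m
    | none => (path.length : Int)

-- ===== PRECONDITION & SPEC =====
def Spec_findPathEnd (path : String) (out : Int) : Prop := out = findPathEnd_alt path
instance (path : String) (out : Int) : Decidable (Spec_findPathEnd path out) := by unfold Spec_findPathEnd; infer_instance

-- ===== CLAIM (what is proved, stated in full; the proofs are below) =====
def Claim_equal_findPathEnd : Prop := ∀ (path : String), Dom_findPathEnd path → Spec_findPathEnd path (findPathEnd path)

-- ===== LEMMAS AND PROOFS =====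

-- the membership test of both ports, as a plain predicate
def isSep (c : Char) : Bool := pathSeparators.contains c

theorem singleton_infix_iff (c : Char) (l : List Char) : [c] <:+: l ↔ c ∈ l := by
  constructor
  · intro h; exact h.subset (List.mem_singleton_self c)
  · intro h
    obtain ⟨s, t, rfl⟩ := List.append_of_mem h
    exact ⟨s, t, by simp⟩

theorem isIn_singleton (c : Char) (l : List Char) :
    PySem.Chars.isIn [c] l = l.contains c := by
  by_cases h : c ∈ l
  · rw [List.contains_eq_mem]
    simp only [h, decide_true]
    simp [PySem.Chars.isIn_iff_infix, (singleton_infix_iff c l).mpr h]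
  · rw [List.contains_eq_mem]
    simp only [h, decide_false]
    rw [PySem.Chars.isIn_eq_false_iff]
    exact fun hinf => h ((singleton_infix_iff c l).mp hinf)

-- invariant of A's while loop
theorem findPathEndLoop_eq (path : List Char) (pos : Nat)
    (hpos : pos < path.length) :
    findPathEndLoop path path.length pos
      = pos + 1 + (path.drop (pos + 1)).findIdx isSep := by
  rw [findPathEndLoop]
  rw [dif_pos hpos]
  by_cases hend : path.length ≤ pos + 1
  · have hnil : path.drop (pos + 1) = [] := List.drop_eq_nil_of_le hend
    simp [hend, hnil]
  · push_neg at hend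
    rw [if_neg (by omega)]
    have hdrop : path.drop (pos + 1) = path[pos + 1] :: path.drop (pos + 1 + 1) :=
      (List.getElem_cons_drop hend).symm
    rw [isIn_singleton]
    rw [List.getD_eq_getElem _ _ hend]
    by_cases hsep : isSep path[pos + 1]
    · rw [if_pos (show pathSeparators.contains path[pos + 1] = true from hsep)]
      rw [hdrop, List.findIdx_cons, hsep]
      simp
    · rw [if_neg (show ¬ pathSeparators.contains path[pos + 1] = true from hsep)]
      rw [findPathEndLoop_eq path (pos + 1) hend]
      rw [hdrop, List.findIdx_cons, Bool.eq_false_iff.mpr hsep]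
      simp only [cond_false]
      omega
  termination_by path.length - pos

-- single-char prefix of a drop = that character sits at that index
theorem singleton_prefix_drop {c : Char} {l : List Char} {i : Nat} :
    [c] <+: l.drop i ↔ ∃ h : i < l.length, l[i] = c := by
  constructor
  · rintro ⟨t, ht⟩
    have hi : i < l.length := by
      by_contra h
      have hnil : l.drop i = [] := List.drop_eq_nil_of_le (by omega)
      rw [hnil] at ht; simp at ht
    refine ⟨hi, ?_⟩
    have h2 : c :: t = l[i] :: l.drop (i + 1) :=
      ht.trans (List.getElem_cons_drop hi).symm
    exact (List.cons.injEq _ _ _ _ ▸ h2 : _ ∧ _).1.symm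
  · rintro ⟨hi, hc⟩
    exact ⟨l.drop (i + 1), by rw [← hc]; exact List.getElem_cons_drop hi⟩

-- per-separator value computed by B, rewritten through the PySem find bridge
theorem findFrom_bridge (path : String) (sep : Char) (h1 : (1:Nat) ≤ path.toList.length) :
    PySem.Str.findFrom path (String.ofList [sep]) 1
      = (if PySem.Chars.find (path.toList.drop 1) [sep] = -1 then -1
         else 1 + PySem.Chars.find (path.toList.drop 1) [sep]) := by
  have h := PySem.Chars.findFrom_natCast path.toList [sep] 1 h1
  simp at h ⊢
  simpa using h

-- a separator sitting at index i bounds the first-separator index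
theorem findIdx_le_of_sep (L : List Char) (i : Nat) (hi : i < L.length)
    (hs : isSep L[i] = true) : L.findIdx isSep ≤ i := by
  by_contra h
  push_neg at h
  have h2 : isSep L[i] = false := List.not_of_lt_findIdx (p := isSep) (xs := L) h
  rw [h2] at hs
  exact Bool.false_ne_true hs

-- B computes 1 + the index of the first separator after position 0 (or len(path))
theorem alt_eq (path : String) (h2 : 1 < path.length) :
    findPathEnd_alt path = ((1 + (path.toList.drop 1).findIdx isSep : Nat) : Int) := by
  have hlen : path.toList.length = path.length := by simp
  set L' : List Char := path.toList.drop 1 with hL'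
  have hL'len : L'.length = path.length - 1 := by simp [hL']
  set j : Nat := L'.findIdx isSep with hj
  have hjle : j ≤ L'.length := List.findIdx_le_length
  unfold findPathEnd_alt
  rw [if_neg (by omega)]
  have hg : ∀ sep : Char, PySem.Str.findFrom path (String.ofList [sep]) 1
      = (if PySem.Chars.find L' [sep] = -1 then -1
         else 1 + PySem.Chars.find L' [sep]) :=
    fun sep => findFrom_bridge path sep (by omega)
  set hits : List Int := (pathSeparators.map
      (fun sep => PySem.Str.findFrom path (String.ofList [sep]) 1)).filter (fun i => 0 ≤ i)
    with hhits
  by_cases hcase : j = L'.length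
  · -- no separator after position 0: every find is -1, hits is empty
    have hnone : ∀ x ∈ L', isSep x = false :=
      List.findIdx_eq_length.mp (by rw [← hj]; exact hcase)
    have hempty : hits = [] := by
      rw [hhits, List.filter_eq_nil_iff]
      intro a ha
      obtain ⟨sep, hsepmem, hsep⟩ := List.mem_map.mp ha
      have hfind : PySem.Chars.find L' [sep] = -1 := by
        rw [PySem.Chars.find_eq_neg_one_iff]
        intro hinf
        have hmem : sep ∈ L' := (singleton_infix_iff sep L').mp hinf
        have hfalse : isSep sep = false := hnone sep hmem
        rw [show isSep sep = pathSeparators.contains sep from rfl,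
            List.contains_eq_mem, decide_eq_false_iff_not] at hfalse
        exact hfalse hsepmem
      rw [hg sep, if_pos hfind] at hsep
      simp [← hsep]
    rw [hempty]
    rw [(PySem.List.min?_eq_none_iff ([] : List Int) (fun x => x)).mpr rfl]
    show (path.length : Int) = ((1 + j : Nat) : Int)
    omega
  · -- a separator exists: the first one sits at index j of L'
    have hjlt : j < L'.length := lt_of_le_of_ne hjle hcase
    have hc0 : isSep L'[j] = true := by
      have h := List.findIdx_getElem (p := isSep) (xs := L') (w := hjlt)
      exact h
    -- find L' [L'[j]] = j
    have hfindc0 : PySem.Chars.find L' [L'[j]] = (j : Int) := by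
      have hmem : L'[j] ∈ L' := List.getElem_mem hjlt
      have hpos : 0 ≤ PySem.Chars.find L' [L'[j]] := by
        rw [PySem.Chars.find_nonneg_iff]
        exact (singleton_infix_iff L'[j] L').mpr hmem
      obtain ⟨hpre, hmin⟩ := PySem.Chars.find_spec (s := L') (sub := [L'[j]]) hpos
      obtain ⟨ht, hceq⟩ := singleton_prefix_drop.mp hpre
      have h1 : j ≤ (PySem.Chars.find L' [L'[j]]).toNat := by
        have h := findIdx_le_of_sep L' (PySem.Chars.find L' [L'[j]]).toNat ht
          (by rw [show L'[(PySem.Chars.find L' [L'[j]]).toNat] = L'[j] from hceq]; exact hc0)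
        exact h
      have h2 : ¬ j < (PySem.Chars.find L' [L'[j]]).toNat := fun h =>
        hmin j h (singleton_prefix_drop.mpr ⟨hjlt, rfl⟩)
      omega
    -- (1 + j) is an element of hits
    have hmemhits : ((1 + j : Nat) : Int) ∈ hits := by
      rw [hhits, List.mem_filter]
      refine ⟨List.mem_map.mpr ⟨L'[j], ?_, ?_⟩, by simp only [decide_eq_true_eq]; positivity⟩
      · have := hc0
        rw [show isSep L'[j] = pathSeparators.contains L'[j] from rfl,
            List.contains_eq_mem, decide_eq_true_eq] at this
        exact this
      · rw [hg L'[j], hfindc0, if_neg (by omega)]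
        push_cast; ring
    -- every element of hits is ≥ 1 + j
    have hlb : ∀ x ∈ hits, ((1 + j : Nat) : Int) ≤ x := by
      intro x hx
      rw [hhits, List.mem_filter] at hx
      obtain ⟨hxmap, hx0⟩ := hx
      obtain ⟨sep, hsepmem, hsepeq⟩ := List.mem_map.mp hxmap
      rw [hg sep] at hsepeq
      by_cases hf : PySem.Chars.find L' [sep] = -1
      · rw [if_pos hf] at hsepeq
        simp [← hsepeq] at hx0
      · rw [if_neg hf] at hsepeq
        have hfpos : 0 ≤ PySem.Chars.find L' [sep] := by
          have := PySem.Chars.neg_one_le_find (s := L') (sub := [sep])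
          omega
        obtain ⟨hpre, _⟩ := PySem.Chars.find_spec (s := L') (sub := [sep]) hfpos
        obtain ⟨ht, hceq⟩ := singleton_prefix_drop.mp hpre
        have hge : j ≤ (PySem.Chars.find L' [sep]).toNat := by
          have := findIdx_le_of_sep L' (PySem.Chars.find L' [sep]).toNat ht
            (by rw [show L'[(PySem.Chars.find L' [sep]).toNat] = sep from hceq,
                    show isSep sep = pathSeparators.contains sep from rfl,
                    List.contains_eq_mem, decide_eq_true_eq]
                exact hsepmem)
          exact this
        omega
    -- therefore min? hits = 1 + j
    have hne : hits ≠ [] := List.ne_nil_of_mem hmemhits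
    obtain ⟨m, hm⟩ : ∃ m, PySem.List.min? hits (fun x => x) = some m := by
      cases hmm : PySem.List.min? hits (fun x => x) with
      | none => exact absurd ((PySem.List.min?_eq_none_iff hits (fun x => x)).mp hmm) hne
      | some m => exact ⟨m, rfl⟩
    have hmmem : m ∈ hits := PySem.List.min?_mem hm
    have hmle : m ≤ ((1 + j : Nat) : Int) := PySem.List.min?_isMin hm _ hmemhits
    have hmge : ((1 + j : Nat) : Int) ≤ m := hlb m hmmem
    rw [hm]
    show m = ((1 + j : Nat) : Int)
    omega

-- ===== VERDICT (by name: the statement is the Claim_ definition above) =====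
theorem findPathEnd_spec : Claim_equal_findPathEnd := by
  intro path _hdom
  unfold Spec_findPathEnd findPathEnd
  by_cases hle : path.length ≤ 1
  · simp only [hle, if_pos]
    unfold findPathEnd_alt
    rw [if_pos hle]
  · push_neg at hle
    have hlen : path.toList.length = path.length := by simp
    rw [if_neg (by omega)]
    rw [alt_eq path hle]
    have h0 : 0 < path.toList.length := by omega
    have := findPathEndLoop_eq path.toList 0 h0
    rw [hlen] at this
    rw [this]
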